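-- pv_equiv track=rewrite | github.com/pypi-data/pypi-mirror-378 | packages/puring/puring-0.1.2-py3-none-any.whl/puring/utils.py | strip_none
-- ===== SOURCE A (Python) =====
-- def strip_none(arr):
--     start = 0
--     end = len(arr)
--
--     # сдвигаем начало, пока элементы None
--     while start < end and arr[start] is None:
--         start += 1
--
--     # сдвигаем конец, пока элементы None
--     while end > start and arr[end - 1] is None:
--         end -= 1
--
--     return arr[start:end]
-- ===== SOURCE B (Python) =====
-- def strip_none(arr):
--     idxs = [i for i, x in enumerate(arr) if x is not None]
--     if not idxs:
--         return []
--     return arr[idxs[0]:idxs[-1] + 1]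
-- ===== Notes on version B (the rewrite author's own statement) =====
-- stated objective: simpler
-- what changed: B builds the index list of non-None positions in one comprehension and slices between its first and last entries, instead of A's two sentinel-pointer while-loops scanning inward from each end.
import Mathlib
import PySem

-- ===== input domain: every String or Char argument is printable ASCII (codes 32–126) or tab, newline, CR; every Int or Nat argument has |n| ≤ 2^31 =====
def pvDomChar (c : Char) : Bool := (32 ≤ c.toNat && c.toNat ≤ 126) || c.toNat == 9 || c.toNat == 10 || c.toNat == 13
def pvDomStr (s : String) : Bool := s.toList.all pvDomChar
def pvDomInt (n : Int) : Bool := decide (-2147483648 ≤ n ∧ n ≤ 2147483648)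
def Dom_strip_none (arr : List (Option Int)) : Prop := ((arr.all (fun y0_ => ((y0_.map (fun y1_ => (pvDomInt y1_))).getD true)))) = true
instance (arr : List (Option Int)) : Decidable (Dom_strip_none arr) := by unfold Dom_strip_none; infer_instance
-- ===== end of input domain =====

-- B strips leading/trailing None by collecting the non-None index table once and slicing
-- between its first and last entries, instead of A's two inward end scans (objective: simpler).

-- ===== PORT A =====
-- while start < end and arr[start] is None: start += 1
def aScanStart (arr : List (Option Int)) (s e : Nat) : Nat :=
  if h : s < e ∧ arr.getD s none = none then aScanStart arr (s + 1) e else s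
termination_by e - s
decreasing_by omega

-- while end > start and arr[end - 1] is None: end -= 1
def aScanEnd (arr : List (Option Int)) (s e : Nat) : Nat :=
  if h : s < e ∧ arr.getD (e - 1) none = none then aScanEnd arr s (e - 1) else e
termination_by e
decreasing_by omega

def strip_none (arr : List (Option Int)) : List (Option Int) :=
  let start := aScanStart arr 0 arr.length
  let stop := aScanEnd arr start arr.length
  PySem.List.slice arr (some (start : Int)) (some (stop : Int))

-- ===== PORT B =====
-- idxs = [i for i, x in enumerate(arr) if x is not None]
def idxsOf (arr : List (Option Int)) : List Int :=
  ((PySem.List.enumerate arr 0).filter (fun p => p.2.isSome)).map (·.1)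

def strip_none_alt (arr : List (Option Int)) : List (Option Int) :=
  if hne : idxsOf arr = [] then []
  else PySem.List.slice arr (some ((idxsOf arr).head hne)) (some ((idxsOf arr).getLast hne + 1))

-- ===== PRECONDITION & SPEC =====
def Spec_strip_none (arr : List (Option Int)) (out : List (Option Int)) : Prop := out = strip_none_alt arr
instance (arr : List (Option Int)) (out : List (Option Int)) : Decidable (Spec_strip_none arr out) := by unfold Spec_strip_none; infer_instance

-- ===== CLAIM (what is proved, stated in full; the proofs are below) =====
def Claim_equal_strip_none : Prop := ∀ (arr : List (Option Int)), Dom_strip_none arr → Spec_strip_none arr (strip_none arr)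

-- ===== LEMMAS AND PROOFS =====

lemma mem_idxsOf {arr : List (Option Int)} {j : Int} :
    j ∈ idxsOf arr ↔ ∃ k : Nat, k < arr.length ∧ j = (k : Int) ∧ arr.getD k none ≠ none := by
  simp only [idxsOf, List.mem_map, List.mem_filter, PySem.List.mem_enumerate_iff]
  constructor
  · rintro ⟨p, ⟨⟨k, hk, rfl⟩, hs⟩, rfl⟩
    refine ⟨k, hk, by simp, ?_⟩
    simp only at hs
    rw [List.getD_eq_getElem _ _ hk]
    simpa [Option.isSome_iff_ne_none] using hs
  · rintro ⟨k, hk, rfl, hne⟩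
    refine ⟨((k : Int), arr[k]), ⟨⟨k, hk, by simp⟩, ?_⟩, rfl⟩
    rw [List.getD_eq_getElem _ _ hk] at hne
    simpa [Option.isSome_iff_ne_none] using hne

lemma pairwise_idxsOf (arr : List (Option Int)) : (idxsOf arr).Pairwise (· < ·) := by
  unfold idxsOf
  exact List.pairwise_map.mpr ((PySem.List.pairwise_lt_enumerate arr 0).filter _)

lemma le_getLast_of_pairwise {l : List Int} (hp : l.Pairwise (· < ·)) (hne : l ≠ []) :
    ∀ j ∈ l, j ≤ l.getLast hne := by
  induction l with
  | nil => simp at hne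
  | cons a t ih =>
    intro j hj
    rcases List.mem_cons.mp hj with rfl | hjt
    · cases t with
      | nil => simp
      | cons b u =>
        have hlast : (b :: u).getLast (by simp) ∈ b :: u := List.getLast_mem _
        have := (List.pairwise_cons.mp hp).1 _ hlast
        simpa [List.getLast_cons] using this.le
    · cases t with
      | nil => simp at hjt
      | cons b u =>
        have := ih (List.pairwise_cons.mp hp).2 (by simp) j hjt
        simpa [List.getLast_cons] using this

lemma head_le_of_pairwise {l : List Int} (hp : l.Pairwise (· < ·)) (hne : l ≠ []) :
    ∀ j ∈ l, l.head hne ≤ j := by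
  cases l with
  | nil => exact absurd rfl hne
  | cons a t =>
    intro j hj
    rcases List.mem_cons.mp hj with rfl | hjr
    · simp
    · exact ((List.pairwise_cons.mp hp).1 j hjr).le

lemma aScanStart_char (arr : List (Option Int)) (s e : Nat) (hse : s ≤ e) :
    s ≤ aScanStart arr s e ∧ aScanStart arr s e ≤ e ∧
    (∀ i, s ≤ i → i < aScanStart arr s e → arr.getD i none = none) ∧
    (aScanStart arr s e < e → arr.getD (aScanStart arr s e) none ≠ none) := by
  unfold aScanStart
  split_ifs with h
  · obtain ⟨h1, h2⟩ := h
    have IH := aScanStart_char arr (s + 1) e h1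
    refine ⟨by omega, IH.2.1, ?_, IH.2.2.2⟩
    intro i hsi hil
    rcases Nat.eq_or_lt_of_le hsi with rfl | hlt
    · exact h2
    · exact IH.2.2.1 i hlt hil
  · exact ⟨le_refl s, hse, by omega, fun hlt hc => h ⟨hlt, hc⟩⟩
termination_by e - s
decreasing_by omega

lemma aScanEnd_char (arr : List (Option Int)) (s e : Nat) (hse : s ≤ e) :
    s ≤ aScanEnd arr s e ∧ aScanEnd arr s e ≤ e ∧
    (∀ i, aScanEnd arr s e ≤ i → i < e → arr.getD i none = none) ∧
    (s < aScanEnd arr s e → arr.getD (aScanEnd arr s e - 1) none ≠ none) := by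
  unfold aScanEnd
  split_ifs with h
  · obtain ⟨h1, h2⟩ := h
    have IH := aScanEnd_char arr s (e - 1) (by omega)
    refine ⟨IH.1, by omega, ?_, IH.2.2.2⟩
    intro i hi hie
    by_cases hc : i < e - 1
    · exact IH.2.2.1 i hi hc
    · have hieq : i = e - 1 := by omega
      subst hieq; exact h2
  · exact ⟨hse, le_refl e, by omega, fun hlt hc => h ⟨hlt, hc⟩⟩
termination_by e
decreasing_by omega

-- ===== VERDICT (by name: the statement is the Claim_ definition above) =====
theorem strip_none_spec : Claim_equal_strip_none := by
  unfold Claim_equal_strip_none Spec_strip_none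
  intro arr _
  set n := arr.length with hn
  have CS := aScanStart_char arr 0 n (Nat.zero_le n)
  set s := aScanStart arr 0 n with hs
  have CE := aScanEnd_char arr s n CS.2.1
  set e := aScanEnd arr s n with he
  show PySem.List.slice arr (some (s : Int)) (some (e : Int)) = strip_none_alt arr
  unfold strip_none_alt
  split_ifs with hne
  · -- all None: s = n, e = n
    have hall : ∀ k, k < n → arr.getD k none = none := by
      intro k hk
      by_contra hc
      have : (k : Int) ∈ idxsOf arr := mem_idxsOf.mpr ⟨k, hk, rfl, hc⟩
      simp [hne] at this
    have hsn : s = n := by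
      rcases Nat.lt_or_ge s n with hlt | hge
      · exact absurd (hall s hlt) (CS.2.2.2 hlt)
      · omega
    have hen : e = n := by omega
    rw [hsn, hen, PySem.List.slice_natCast]
    simp
  · -- some non-None: head and getLast bracket exactly A's pointers
    set lo := (idxsOf arr).head hne with hlo
    set hi := (idxsOf arr).getLast hne with hhi
    have hlo_mem : lo ∈ idxsOf arr := List.head_mem hne
    have hhi_mem : hi ∈ idxsOf arr := List.getLast_mem hne
    obtain ⟨kl, hkl, hloe, hklne⟩ := mem_idxsOf.mp hlo_mem
    obtain ⟨kh, hkh, hhie, hkhne⟩ := mem_idxsOf.mp hhi_mem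
    have hmin := head_le_of_pairwise (pairwise_idxsOf arr) hne
    have hmax := le_getLast_of_pairwise (pairwise_idxsOf arr) hne
    -- s = kl
    have hskl : s = kl := by
      have h1 : s ≤ kl := by
        by_contra hc
        exact hklne (CS.2.2.1 kl (Nat.zero_le kl) (by omega))
      have h2 : kl ≤ s := by
        by_contra hc
        have hsn : s < n := by omega
        have hmem : (s : Int) ∈ idxsOf arr :=
          mem_idxsOf.mpr ⟨s, hsn, rfl, CS.2.2.2 hsn⟩
        have := hmin _ hmem
        rw [← hlo, hloe] at this
        have : kl ≤ s := by exact_mod_cast this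
        omega
      omega
    have hklkh : kl ≤ kh := by
      have := hmin _ hhi_mem
      rw [← hlo, hloe, hhie] at this
      exact_mod_cast this
    -- e = kh + 1
    have hekh : e = kh + 1 := by
      have h1 : kh < e := by
        by_contra hc
        exact hkhne (CE.2.2.1 kh (by omega) hkh)
      have h2 : e ≤ kh + 1 := by
        have hse2 : s < e := by omega
        have hlt : e - 1 < n := by omega
        have hmem : ((e - 1 : Nat) : Int) ∈ idxsOf arr :=
          mem_idxsOf.mpr ⟨e - 1, hlt, rfl, CE.2.2.2 hse2⟩
        have := hmax _ hmem
        rw [← hhi, hhie] at this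
        have : e - 1 ≤ kh := by exact_mod_cast this
        omega
      omega
    rw [hskl, hekh, hloe, hhie]
    norm_num
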